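-- pv_equiv track=rewrite | github.com/Yufok1/Ouroboros-key-champion-council | self_deploy/backend/mcp_proxy.py | _doc_unescape_key
-- ===== SOURCE A (Python) =====
-- def _doc_unescape_key(value: str) -> str:
--     s = str(value)
--     out = []
--     i = 0
--     n = len(s)
--     while i < n:
--         ch = s[i]
--         if ch == "~" and i + 1 < n:
--             nxt = s[i + 1]
--             if nxt == "~":
--                 out.append("~")
--                 i += 2
--                 continue
--             if nxt == "s":
--                 out.append("/")
--                 i += 2
--                 continue
--         out.append(ch)
--         i += 1
--     return "".join(out)
-- ===== SOURCE B (Python) =====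
-- import re
--
-- _TOKEN = re.compile(r"~~|~s")
--
--
-- def _doc_unescape_key(value: str) -> str:
--     return _TOKEN.sub(lambda m: "~" if m.group() == "~~" else "/", str(value))
-- ===== Notes on version B (the rewrite author's own statement) =====
-- stated objective: idiomatic
-- what changed: Replaces the hand-written index/while loop with an accumulator list by a single compiled re.sub over the two escape tokens, with a replacement function mapping the tilde-tilde token to a tilde and the tilde-s token to a slash.
import Mathlib
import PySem

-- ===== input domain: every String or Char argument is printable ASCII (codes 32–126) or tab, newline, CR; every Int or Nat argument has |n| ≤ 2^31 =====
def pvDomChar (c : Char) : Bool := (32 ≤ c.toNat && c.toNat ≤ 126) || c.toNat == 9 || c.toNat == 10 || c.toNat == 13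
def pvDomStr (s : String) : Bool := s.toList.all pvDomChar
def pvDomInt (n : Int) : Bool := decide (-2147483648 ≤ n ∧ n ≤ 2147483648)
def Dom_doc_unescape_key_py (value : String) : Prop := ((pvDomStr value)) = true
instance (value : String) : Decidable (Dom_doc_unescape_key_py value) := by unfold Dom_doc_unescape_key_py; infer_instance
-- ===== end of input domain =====

-- B replaces A's index-based while loop (manual lookahead, accumulator list) by a
-- single regex substitution of the tokens '~~'/'~s' (ported as a pattern-match scan);
-- objective: more idiomatic, same O(n) cost.

-- ===== PORT A =====
-- A's while loop over index i with accumulator `out`; s[i] via getD (indices proved in range by the loop guard).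
def docUnescapeAuxA (s : List Char) (n i : Nat) (out : List Char) : List Char :=
  if i < n then
    let ch := s.getD i ' '
    if ch = '~' ∧ i + 1 < n then
      let nxt := s.getD (i + 1) ' '
      if nxt = '~' then docUnescapeAuxA s n (i + 2) (out ++ ['~'])
      else if nxt = 's' then docUnescapeAuxA s n (i + 2) (out ++ ['/'])
      else docUnescapeAuxA s n (i + 1) (out ++ [ch])
    else docUnescapeAuxA s n (i + 1) (out ++ [ch])
  else out
termination_by n - i

def doc_unescape_key_py (value : String) : String :=
  let s := value.toList
  String.ofList (docUnescapeAuxA s s.length 0 [])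

-- ===== PORT B =====
-- B's regex engine: non-overlapping left-to-right scan replacing the tokens '~~' → '~' and '~s' → '/'.
def docUnescapeScanB : List Char → List Char
  | '~' :: '~' :: rest => '~' :: docUnescapeScanB rest
  | '~' :: 's' :: rest => '/' :: docUnescapeScanB rest
  | c :: rest => c :: docUnescapeScanB rest
  | [] => []

def doc_unescape_key_py_alt (value : String) : String :=
  String.ofList (docUnescapeScanB value.toList)

-- ===== PRECONDITION & SPEC =====
def Spec_doc_unescape_key_py (value : String) (out : String) : Prop := out = doc_unescape_key_py_alt value
instance (value : String) (out : String) : Decidable (Spec_doc_unescape_key_py value out) := by unfold Spec_doc_unescape_key_py; infer_instance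

-- ===== CLAIM (what is proved, stated in full; the proofs are below) =====
def Claim_equal_doc_unescape_key_py : Prop := ∀ (value : String), Dom_doc_unescape_key_py value → Spec_doc_unescape_key_py value (doc_unescape_key_py value)

-- ===== LEMMAS AND PROOFS =====

theorem scanB_cons_ne (c : Char) (rest : List Char) (h : c ≠ '~') :
    docUnescapeScanB (c :: rest) = c :: docUnescapeScanB rest := by
  cases rest with
  | nil => simp [docUnescapeScanB]
  | cons d tl =>
    rw [docUnescapeScanB.eq_def]
    split
    · rename_i heq; injection heq with h1 _; exact absurd h1 h
    · rename_i heq; injection heq with h1 _; exact absurd h1 h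
    · rename_i heq; injection heq with h1 h2; subst h1; subst h2; rfl
    · rename_i heq; simp at heq

theorem scanB_tilde_other (d : Char) (rest : List Char) (h1 : d ≠ '~') (h2 : d ≠ 's') :
    docUnescapeScanB ('~' :: d :: rest) = '~' :: docUnescapeScanB (d :: rest) := by
  rw [docUnescapeScanB.eq_def]
  split
  · rename_i heq; injection heq with _ heq'; injection heq' with hd _; exact absurd hd h1
  · rename_i heq; injection heq with _ heq'; injection heq' with hd _; exact absurd hd h2
  · rename_i heq; injection heq with h1 h2; subst h1; subst h2; rfl
  · rename_i heq; simp at heq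

theorem auxA_eq_scanB (s : List Char) (i : Nat) (out : List Char) :
    docUnescapeAuxA s s.length i out = out ++ docUnescapeScanB (s.drop i) := by
  by_cases h : i < s.length
  · have hdrop : s.drop i = s[i] :: s.drop (i + 1) := List.drop_eq_getElem_cons h
    rw [docUnescapeAuxA, if_pos h]
    simp only [List.getD_eq_getElem s ' ' h]
    by_cases hch : s[i] = '~' ∧ i + 1 < s.length
    · obtain ⟨hch1, hch2⟩ := hch
      rw [if_pos ⟨hch1, hch2⟩]
      have hdrop1 : s.drop (i + 1) = s[i + 1] :: s.drop (i + 2) := List.drop_eq_getElem_cons hch2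
      simp only [List.getD_eq_getElem s ' ' hch2]
      by_cases hn1 : s[i + 1] = '~'
      · rw [if_pos hn1, auxA_eq_scanB s (i + 2) (out ++ ['~']), hdrop, hdrop1, hch1, hn1]
        simp [docUnescapeScanB]
      · rw [if_neg hn1]
        by_cases hn2 : s[i + 1] = 's'
        · rw [if_pos hn2, auxA_eq_scanB s (i + 2) (out ++ ['/']), hdrop, hdrop1, hch1, hn2]
          simp [docUnescapeScanB]
        · rw [if_neg hn2, auxA_eq_scanB s (i + 1) (out ++ [s[i]]), hdrop, hdrop1, hch1,
            scanB_tilde_other _ _ hn1 hn2]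
          simp
    · rw [if_neg hch, auxA_eq_scanB s (i + 1) (out ++ [s[i]]), hdrop]
      by_cases htl : s[i] = '~'
      · have hlen : ¬ i + 1 < s.length := fun hc => hch ⟨htl, hc⟩
        have : s.drop (i + 1) = [] := List.drop_eq_nil_of_le (by omega)
        rw [this, htl]
        simp [docUnescapeScanB]
      · rw [scanB_cons_ne _ _ htl]
        simp
  · rw [docUnescapeAuxA, if_neg h]
    have : s.drop i = [] := List.drop_eq_nil_of_le (by omega)
    simp [this, docUnescapeScanB]
termination_by s.length - i

-- ===== VERDICT (by name: the statement is the Claim_ definition above) =====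
theorem doc_unescape_key_py_spec : Claim_equal_doc_unescape_key_py := by
  intro value _
  unfold Spec_doc_unescape_key_py doc_unescape_key_py doc_unescape_key_py_alt
  show String.ofList (docUnescapeAuxA value.toList value.toList.length 0 []) = _
  rw [auxA_eq_scanB value.toList 0 [], List.drop_zero, List.nil_append]
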